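-- pv_equiv track=rewrite | github.com/uucyce/vetka-mcp-full | src/visualizer/position_calculator.py | _assign_layers
-- ===== SOURCE A (Python) =====
-- from typing import Dict, List, Optional, Any
-- from collections import defaultdict
--
-- def _assign_layers(nodes: List[Dict], edges: List[Dict]) -> List[List[Dict]]:
--     """
--     Phase 1: Assign nodes to layers using the longest path method.
--
--     Instead of simple depth/path counting, calculates the maximum depth of each node's
--     subtree. This ensures longer branches rise higher, creating a proper hierarchical
--     tree layout where folders with more descendants are positioned above leaf nodes.
--
--     Algorithm:
--     1. Build a child map from edges (parent -> children)
--     2. Recursively compute max_depth for each node: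
--        - Leaf nodes: max_depth = 0
--        - Internal nodes: max_depth = 1 + max(children's depths)
--     3. Assign layers based on max_depth (highest values = topmost layers)
--     """
--     # Build child map: node_id -> [child_ids]
--     children_map = defaultdict(list)
--     node_dict = {node['id']: node for node in nodes}
--
--     for edge in edges:
--         source = edge.get('source') or edge.get('from')
--         target = edge.get('target') or edge.get('to')
--         if source and target:
--             children_map[source].append(target)
--
--     # Cache for computed depths
--     depth_cache = {}
--
--     def compute_max_depth(node_id: str) -> int:
--         """
--         Recursively compute the maximum depth of a node's subtree.
--
--         Returns:
--             0 for leaf nodes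
--             1 + max(children_depths) for internal nodes
--         """
--         if node_id in depth_cache:
--             return depth_cache[node_id]
--
--         children = children_map.get(node_id, [])
--
--         if not children:
--             # Leaf node
--             depth = 0
--         else:
--             # Internal node: max depth is 1 + max depth of children
--             max_child_depth = max(compute_max_depth(child_id) for child_id in children)
--             depth = 1 + max_child_depth
--
--         depth_cache[node_id] = depth
--         return depth
--
--     # Compute layer (max_depth) for each node
--     layer_map = defaultdict(list)
--     for node in nodes:
--         layer = compute_max_depth(node['id'])
--         layer_map[layer].append(node)
--
--     # Build ordered layer list from highest depth to lowest (top to bottom in visualization)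
--     if not layer_map:
--         return []
--
--     max_layer = max(layer_map.keys())
--     # Reverse the order: highest depths first (will appear at top of visualization)
--     return [layer_map.get(max_layer - d, []) for d in range(max_layer + 1)]
-- ===== SOURCE B (Python) =====
-- def _assign_layers(nodes, edges):
--     """Layer assignment by longest-path depth, computed by bounded value iteration
--     (Bellman-Ford style) instead of memoized recursion."""
--     # Extract the valid (source, target) pairs, then group children per source.
--     pairs = []
--     for edge in edges:
--         s = edge.get('source') or edge.get('from')
--         t = edge.get('target') or edge.get('to')
--         if s and t:
--             pairs.append((s, t))
--     children = {}
--     for s, t in pairs: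
--         children.setdefault(s, []).append(t)
--
--     # After k rounds, D[n] is the longest-path depth of n capped at k; len(edges)+1
--     # rounds reach the fixed point on any acyclic graph. Nodes without children
--     # (not in D) have depth 0.
--     D = {}
--     for _ in range(len(edges) + 1):
--         D = {s: 1 + max(D.get(c, 0) for c in cs) for s, cs in children.items()}
--
--     # Bucket the nodes by depth, in their original order.
--     layers = {}
--     for node in nodes:
--         layers.setdefault(D.get(node['id'], 0), []).append(node)
--
--     if not layers:
--         return []
--     top = max(layers)
--     return [layers.get(top - d, []) for d in range(top + 1)]
-- ===== Notes on version B (the rewrite author's own statement) =====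
-- stated objective: alternative
-- what changed: Replaces the memoized recursive subtree-depth computation (inner closure + cache dict) with a bounded Bellman-Ford style value iteration: a depth dict is rebuilt len(edges)+1 times until it holds every node's longest-path depth, and nodes are then bucketed by looking the depth up; no recursion and no cache. Same-cost trade: it cannot hit Python's recursion limit, at the price of an O(E^2) worst case.
import Mathlib
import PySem

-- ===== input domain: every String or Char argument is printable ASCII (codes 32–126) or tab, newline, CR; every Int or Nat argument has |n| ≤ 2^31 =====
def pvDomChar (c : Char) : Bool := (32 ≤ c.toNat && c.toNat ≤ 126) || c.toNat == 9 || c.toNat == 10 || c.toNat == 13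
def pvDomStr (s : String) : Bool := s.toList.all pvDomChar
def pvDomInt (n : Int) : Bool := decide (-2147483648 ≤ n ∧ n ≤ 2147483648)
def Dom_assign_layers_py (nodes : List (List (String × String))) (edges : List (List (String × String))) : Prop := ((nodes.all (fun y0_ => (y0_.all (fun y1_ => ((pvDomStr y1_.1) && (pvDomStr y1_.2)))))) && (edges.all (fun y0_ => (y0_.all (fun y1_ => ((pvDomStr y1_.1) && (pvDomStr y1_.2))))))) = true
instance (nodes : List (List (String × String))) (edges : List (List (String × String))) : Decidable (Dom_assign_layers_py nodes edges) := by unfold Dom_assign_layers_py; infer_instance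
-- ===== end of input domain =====

-- B replaces A's memoized recursion over the child map by a bounded value iteration
-- (rebuild the depth dict len(edges)+1 times); same results, no recursion and no cache.

-- ===== PORT A =====

-- `a or b` on two Optional[str] operands (Python truthiness: a non-empty string wins)
def pvOrStr (a b : Option String) : Option String :=
  match a with
  | some s => if s = "" then b else some s
  | none => b

-- the body of A's edge loop up to `if source and target`: the accepted (source, target) pair
def pvEdgeST (e : List (String × String)) : Option (String × String) :=
  match pvOrStr ((PySem.Dict.mk e).get? "source") ((PySem.Dict.mk e).get? "from"),
        pvOrStr ((PySem.Dict.mk e).get? "target") ((PySem.Dict.mk e).get? "to") with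
  | some s, some t => if s = "" ∨ t = "" then none else some (s, t)
  | _, _ => none

-- node['id'] ; the KeyError case (no "id" key) is excluded by Pre_, where the default is unreachable
def pvNodeId (node : List (String × String)) : String :=
  ((PySem.Dict.mk node).get? "id").getD ""

-- max(non-empty iterable of ints); the default is unreachable at call sites
def pvMaxIntD (l : List Int) : Int :=
  match PySem.List.max? l (fun x => x) with
  | some m => m
  | none => 0

-- A's edge loop: children_map = defaultdict(list); children_map[source].append(target)
def pvChildrenA (edges : List (List (String × String))) : PySem.Dict String (List String) :=
  edges.foldl (fun cm e =>
    match pvEdgeST e with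
    | some st => cm.modify st.1 [] (· ++ [st.2])
    | none => cm) PySem.Dict.empty

-- compute_max_depth with its cache, made total by a fuel argument (never exhausted under Pre_)
def pvComputeA (cm : PySem.Dict String (List String)) :
    Nat → String → PySem.Dict String Int → Int × PySem.Dict String Int
  | 0, _, cache => (0, cache)
  | Nat.succ f, n, cache =>
    match cache.get? n with
    | some v => (v, cache)
    | none =>
      let cs := cm.getD n []
      if cs = [] then (0, cache.insert n 0)
      else
        let r := cs.foldl (fun (acc : List Int × PySem.Dict String Int) c =>
          let vc := pvComputeA cm f c acc.2
          (acc.1 ++ [vc.1], vc.2)) (([] : List Int), cache)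
        let depth := 1 + pvMaxIntD r.1
        (depth, r.2.insert n depth)

-- `if not layer_map: return []` and the final reversed layer list (identical in A and B)
def pvAssemble (lm : PySem.Dict Int (List (List (String × String)))) :
    List (List (List (String × String))) :=
  if lm.items = [] then []
  else
    match PySem.List.max? lm.keys (fun x => x) with
    | some m => (PySem.List.pyRange 0 (m + 1) 1).map (fun d => lm.getD (m - d) [])
    | none => []

def assign_layers_py (nodes : List (List (String × String))) (edges : List (List (String × String))) : List (List (List (String × String))) :=
  let _node_dict := nodes.foldl
    (fun d node => d.insert (pvNodeId node) node)
    (PySem.Dict.empty : PySem.Dict String (List (String × String)))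
  let cm := pvChildrenA edges
  let r := nodes.foldl
    (fun (acc : PySem.Dict Int (List (List (String × String))) × PySem.Dict String Int) node =>
      let lc := pvComputeA cm (edges.length + 1) (pvNodeId node) acc.2
      (acc.1.modify lc.1 [] (· ++ [node]), lc.2))
    (PySem.Dict.empty, PySem.Dict.empty)
  pvAssemble r.1

-- ===== PORT B =====

-- B first extracts the valid (source, target) pairs as a list
def pvPairs (edges : List (List (String × String))) : List (String × String) :=
  edges.filterMap pvEdgeST

-- children.setdefault(s, []).append(t)
def pvChildrenB (pairs : List (String × String)) : PySem.Dict String (List String) :=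
  pairs.foldl (fun d p => d.insert p.1 (d.getD p.1 [] ++ [p.2])) PySem.Dict.empty

-- one round: D = {s: 1 + max(D.get(c, 0) for c in cs) for s, cs in children.items()}
def pvStepB (children : PySem.Dict String (List String)) (D : PySem.Dict String Int) :
    PySem.Dict String Int :=
  children.items.foldl
    (fun d p => d.insert p.1 (1 + pvMaxIntD (p.2.map (fun c => D.getD c 0))))
    PySem.Dict.empty

-- the `for _ in range(len(edges) + 1)` loop
def pvIterB (children : PySem.Dict String (List String)) : Nat → PySem.Dict String Int
  | 0 => PySem.Dict.empty
  | Nat.succ k => pvStepB children (pvIterB children k)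

def assign_layers_py_alt (nodes : List (List (String × String))) (edges : List (List (String × String))) : List (List (List (String × String))) :=
  let children := pvChildrenB (pvPairs edges)
  let D := pvIterB children (edges.length + 1)
  let layers := nodes.foldl
    (fun lm node =>
      let dep := D.getD (pvNodeId node) 0
      lm.insert dep (lm.getD dep [] ++ [node]))
    (PySem.Dict.empty : PySem.Dict Int (List (List (String × String))))
  pvAssemble layers

-- ===== PRECONDITION & SPEC =====

-- bounded reachability in the extracted edge-pair graph: pvBR P f a b = "there is a path
-- from a to b with at most f edges"
def pvBR (P : List (String × String)) : Nat → String → String → Bool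
  | 0, a, b => a == b
  | Nat.succ f, a, b => a == b || P.any (fun p => p.1 == a && pvBR P f p.2 b)

-- Pre_ excludes exactly the inputs where A raises: a node without an 'id' key (KeyError),
-- and an edge cycle reachable from some node's id (unbounded recursion in compute_max_depth).
def Pre_assign_layers_py (nodes : List (List (String × String))) (edges : List (List (String × String))) : Prop :=
  (∀ node ∈ nodes, ((PySem.Dict.mk node).get? "id").isSome = true) ∧
  (∀ node ∈ nodes, ∀ p ∈ pvPairs edges,
      pvBR (pvPairs edges) (pvPairs edges).length (pvNodeId node) p.1 = true →
      pvBR (pvPairs edges) (pvPairs edges).length p.2 p.1 = false)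

instance (nodes : List (List (String × String))) (edges : List (List (String × String))) : Decidable (Pre_assign_layers_py nodes edges) := by
  unfold Pre_assign_layers_py; infer_instance

def pvWitness_assign_layers_py : (List (List (String × String))) × (List (List (String × String))) :=
  ([[("id", "a")], [("id", "b")]], [[("source", "a"), ("target", "b")]])

def Spec_assign_layers_py (nodes : List (List (String × String))) (edges : List (List (String × String))) (out : List (List (List (String × String)))) : Prop := out = assign_layers_py_alt nodes edges
instance (nodes : List (List (String × String))) (edges : List (List (String × String))) (out : List (List (List (String × String)))) : Decidable (Spec_assign_layers_py nodes edges out) := by unfold Spec_assign_layers_py; infer_instance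

-- ===== CLAIM (what is proved, stated in full; the proofs are below) =====
def Claim_equal_assign_layers_py : Prop := ∀ (nodes : List (List (String × String))) (edges : List (List (String × String))), Dom_assign_layers_py nodes edges → Pre_assign_layers_py nodes edges → Spec_assign_layers_py nodes edges (assign_layers_py nodes edges)

-- ===== LEMMAS AND PROOFS =====

-- ---- paths in the pair graph ----

inductive pvTrail (P : List (String × String)) : String → String → List String → Prop
  | refl (a : String) : pvTrail P a a []
  | step {a c b : String} {l : List String} :
      (a, c) ∈ P → pvTrail P c b l → pvTrail P a b (a :: l)

theorem pvBR_refl (P : List (String × String)) (f : Nat) (a : String) :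
    pvBR P f a a = true := by
  cases f <;> simp [pvBR]

theorem pvBR_mono (P : List (String × String)) {f g : Nat} (h : f ≤ g) {a b : String}
    (hab : pvBR P f a b = true) : pvBR P g a b = true := by
  induction f generalizing g a with
  | zero =>
    simp only [pvBR, beq_iff_eq] at hab
    subst hab; exact pvBR_refl P g a
  | succ f ih =>
    cases g with
    | zero => omega
    | succ g =>
      simp only [pvBR, Bool.or_eq_true, beq_iff_eq, List.any_eq_true,
        Bool.and_eq_true] at hab ⊢
      rcases hab with h | ⟨p, hp, h1, h2⟩
      · exact Or.inl h
      · exact Or.inr ⟨p, hp, h1, ih (by omega) h2⟩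

theorem pvTrail_sources {P : List (String × String)} {a b : String} {l : List String}
    (h : pvTrail P a b l) : ∀ x ∈ l, x ∈ P.map Prod.fst := by
  induction h with
  | refl => simp
  | step hmem _ ih =>
    intro x hx
    rcases List.mem_cons.mp hx with rfl | hx
    · exact List.mem_map.mpr ⟨_, hmem, rfl⟩
    · exact ih x hx

theorem pvBR_of_trail {P : List (String × String)} {a b : String} {l : List String}
    (h : pvTrail P a b l) : pvBR P l.length a b = true := by
  induction h with
  | refl => simp [pvBR]
  | step hmem _ ih =>
    simp only [List.length_cons, pvBR, Bool.or_eq_true, beq_iff_eq, List.any_eq_true,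
      Bool.and_eq_true]
    exact Or.inr ⟨_, hmem, rfl, ih⟩

theorem pvTrail_of_bR {P : List (String × String)} {b : String} :
    ∀ (f : Nat) (a : String), pvBR P f a b = true → ∃ l, pvTrail P a b l := by
  intro f
  induction f with
  | zero =>
    intro a h
    simp only [pvBR, beq_iff_eq] at h
    subst h; exact ⟨[], pvTrail.refl a⟩
  | succ f ih =>
    intro a h
    simp only [pvBR, Bool.or_eq_true, beq_iff_eq, List.any_eq_true,
      Bool.and_eq_true] at h
    rcases h with rfl | ⟨p, hp, h1, h2⟩
    · exact ⟨[], pvTrail.refl a⟩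
    · rcases ih p.2 h2 with ⟨l, hl⟩
      refine ⟨a :: l, pvTrail.step ?_ hl⟩
      have hpa : p = (a, p.2) := Prod.ext h1 rfl
      rwa [hpa] at hp

theorem pvTrail_append {P : List (String × String)} {a b c : String} {l l' : List String}
    (h : pvTrail P a b l) (h' : pvTrail P b c l') : pvTrail P a c (l ++ l') := by
  induction h with
  | refl => simpa using h'
  | step hmem _ ih => exact pvTrail.step hmem (ih h')

theorem pvTrail_drop {P : List (String × String)} {c b : String} {l : List String}
    (h : pvTrail P c b l) : ∀ a ∈ l, ∃ m, pvTrail P a b m ∧ m.length ≤ l.length := by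
  induction h with
  | refl => simp
  | @step x y z lt hmem ht ih =>
    intro a ha
    rcases List.mem_cons.mp ha with rfl | ha
    · exact ⟨_, pvTrail.step hmem ht, le_refl _⟩
    · rcases ih a ha with ⟨m, hm, hlen⟩
      exact ⟨m, hm, by simpa using Nat.le_succ_of_le hlen⟩

theorem pvTrail_dedup {P : List (String × String)} {b : String} :
    ∀ (N : Nat) (l : List String) (a : String), l.length ≤ N → pvTrail P a b l →
      ∃ m, pvTrail P a b m ∧ m.Nodup ∧ m.length ≤ l.length := by
  intro N
  induction N with
  | zero =>
    intro l a hlen ht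
    have hnil : l = [] := List.length_eq_zero_iff.mp (Nat.le_zero.mp hlen)
    subst hnil
    exact ⟨[], ht, List.nodup_nil, le_refl _⟩
  | succ N ih =>
    intro l a hlen ht
    cases ht with
    | refl => exact ⟨[], pvTrail.refl _, List.nodup_nil, le_refl _⟩
    | @step _ c _ lt hmem ht2 =>
      have hl2 : lt.length ≤ N := by simpa using hlen
      rcases ih lt c hl2 ht2 with ⟨m1, hm1, hnd1, hlen1⟩
      by_cases hmem1 : a ∈ m1
      · rcases pvTrail_drop hm1 a hmem1 with ⟨m2, hm2, hlen2⟩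
        rcases ih m2 a (by omega) hm2 with ⟨m3, hm3, hnd3, hlen3⟩
        exact ⟨m3, hm3, hnd3, by simp; omega⟩
      · exact ⟨a :: m1, pvTrail.step hmem hm1, List.nodup_cons.mpr ⟨hmem1, hnd1⟩,
          by simpa using Nat.succ_le_succ hlen1⟩

theorem pvBR_F_of_trail {P : List (String × String)} {a b : String} {l : List String}
    (h : pvTrail P a b l) : pvBR P P.length a b = true := by
  rcases pvTrail_dedup l.length l a (le_refl _) h with ⟨m, hm, hnd, _⟩
  have hsub : ∀ x ∈ m, x ∈ P.map Prod.fst := pvTrail_sources hm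
  have hcard : m.length ≤ P.length := by
    have h1 : m.toFinset.card = m.length := List.toFinset_card_of_nodup hnd
    have h2 : m.toFinset ⊆ (P.map Prod.fst).toFinset := by
      intro x hx
      exact List.mem_toFinset.mpr (hsub x (List.mem_toFinset.mp hx))
    have h3 := Finset.card_le_card h2
    have h4 : (P.map Prod.fst).toFinset.card ≤ (P.map Prod.fst).length :=
      List.toFinset_card_le _
    simpa [h1, List.length_map] using h3.trans h4
  exact pvBR_mono P hcard (pvBR_of_trail hm)

theorem pvBR_extend {P : List (String × String)} {a b c : String}
    (h : pvBR P P.length a b = true) (hbc : (b, c) ∈ P) : pvBR P P.length a c = true := by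
  rcases pvTrail_of_bR P.length a h with ⟨l, hl⟩
  exact pvBR_F_of_trail (pvTrail_append hl (pvTrail.step hbc (pvTrail.refl c)))

theorem pvBR_front {P : List (String × String)} {a b c : String}
    (hab : (a, b) ∈ P) (h : pvBR P P.length b c = true) : pvBR P P.length a c = true := by
  rcases pvTrail_of_bR P.length b h with ⟨l, hl⟩
  exact pvBR_F_of_trail (pvTrail.step hab hl)

-- ---- ranks ----

def pvRank (P : List (String × String)) (n : String) : Nat :=
  ((P.map Prod.fst).toFinset.filter (fun s => pvBR P P.length n s = true)).card

theorem pvRank_le (P : List (String × String)) (n : String) : pvRank P n ≤ P.length := by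
  unfold pvRank
  calc ((P.map Prod.fst).toFinset.filter _).card
      ≤ (P.map Prod.fst).toFinset.card := Finset.card_filter_le _ _
    _ ≤ (P.map Prod.fst).length := List.toFinset_card_le _
    _ = P.length := List.length_map ..

def pvAcy (P : List (String × String)) (r : String) : Prop :=
  ∀ p ∈ P, pvBR P P.length r p.1 = true → pvBR P P.length p.2 p.1 = false

theorem pvRank_lt {P : List (String × String)} {r n c : String}
    (hAcy : pvAcy P r) (hr : pvBR P P.length r n = true) (hc : (n, c) ∈ P) :
    pvRank P c < pvRank P n := by
  unfold pvRank
  apply Finset.card_lt_card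
  constructor
  · intro s hs
    rcases Finset.mem_filter.mp hs with ⟨hmem, hbr⟩
    exact Finset.mem_filter.mpr ⟨hmem, pvBR_front hc hbr⟩
  · intro hsub
    have hn : n ∈ (P.map Prod.fst).toFinset.filter (fun s => pvBR P P.length n s = true) :=
      Finset.mem_filter.mpr ⟨List.mem_toFinset.mpr (List.mem_map.mpr ⟨(n, c), hc, rfl⟩),
        pvBR_refl P P.length n⟩
    have hmemf := Finset.mem_filter.mp (hsub hn)
    have hfalse := hAcy (n, c) hc hr
    rw [hmemf.2] at hfalse
    simp at hfalse

-- ---- the child map ----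

theorem pvChildrenA_eq (edges : List (List (String × String))) :
    pvChildrenA edges = pvChildrenB (pvPairs edges) := by
  unfold pvChildrenA pvChildrenB pvPairs
  generalize (PySem.Dict.empty : PySem.Dict String (List String)) = d
  induction edges generalizing d with
  | nil => rfl
  | cons e es ih =>
    cases h : pvEdgeST e with
    | none => simp only [List.foldl_cons, List.filterMap_cons, h]; exact ih d
    | some st => simp only [List.foldl_cons, List.filterMap_cons, h]; exact ih _

theorem pvChildren_getD (P : List (String × String)) (n : String) :
    (pvChildrenB P).getD n [] = (P.filter (fun p => p.1 == n)).map (·.2) := by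
  have hform : pvChildrenB P
      = P.foldl (fun d p => d.modify p.1 [] (· ++ [p.2])) PySem.Dict.empty := rfl
  rw [hform, PySem.Dict.getD_foldl_modify_append]
  simp [PySem.Dict.getD_empty]

theorem pvMem_children {P : List (String × String)} {n c : String} :
    c ∈ (pvChildrenB P).getD n [] ↔ (n, c) ∈ P := by
  rw [pvChildren_getD]
  constructor
  · intro h
    rcases List.mem_map.mp h with ⟨p, hp, hpc⟩
    rcases List.mem_filter.mp hp with ⟨hpP, hp1⟩
    have h1 : p.1 = n := by simpa using hp1
    have hpnc : p = (n, c) := Prod.ext h1 hpc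
    rwa [hpnc] at hpP
  · intro h
    exact List.mem_map.mpr ⟨(n, c), List.mem_filter.mpr ⟨h, by simp⟩, rfl⟩

theorem pvChildren_keys (P : List (String × String)) :
    (pvChildrenB P).keys = PySem.Set.ofList (P.map Prod.fst) := by
  have hform : pvChildrenB P
      = P.foldl (fun d p => d.modify p.1 [] (· ++ [p.2])) PySem.Dict.empty := rfl
  rw [hform, PySem.Dict.keys_foldl_modify_key]
  simp [PySem.Set.update_nil_left, PySem.Dict.keys_empty]

theorem pvChildren_nodup_keys (P : List (String × String)) :
    (pvChildrenB P).keys.Nodup := by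
  rw [pvChildren_keys]
  exact PySem.Set.nodup_ofList _

-- ---- the pure depth function and its stability ----

def pvDP (cm : PySem.Dict String (List String)) : Nat → String → Int
  | 0, _ => 0
  | Nat.succ f, n =>
    let cs := cm.getD n []
    if cs = [] then 0 else 1 + pvMaxIntD (cs.map (pvDP cm f))

theorem pvDP_stable {P : List (String × String)} {r : String} (hAcy : pvAcy P r) :
    ∀ (f : Nat) (n : String) (g : Nat), pvBR P P.length r n = true →
      pvRank P n < f → pvRank P n < g →
      pvDP (pvChildrenB P) f n = pvDP (pvChildrenB P) g n := by
  intro f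
  induction f using Nat.strong_induction_on with
  | _ f ihf =>
    intro n g hrn hf hg
    cases f with
    | zero => omega
    | succ f' =>
      cases g with
      | zero => omega
      | succ g' =>
        simp only [pvDP]
        by_cases hcs : (pvChildrenB P).getD n [] = []
        · simp [hcs]
        · simp only [hcs, ite_false]
          congr 2
          apply List.map_congr_left
          intro c hcmem
          have hP : (n, c) ∈ P := pvMem_children.mp hcmem
          have hrc : pvBR P P.length r c = true := pvBR_extend hrn hP
          have hrank : pvRank P c < pvRank P n := pvRank_lt hAcy hrn hP
          exact ihf f' (by omega) c g' hrc (by omega) (by omega)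

-- the canonical depth of a node
def pvDepth (P : List (String × String)) (n : String) : Int :=
  pvDP (pvChildrenB P) (P.length + 1) n

theorem pvDepth_node {P : List (String × String)} {r n : String} (hAcy : pvAcy P r)
    (hrn : pvBR P P.length r n = true) :
    pvDepth P n = if (pvChildrenB P).getD n [] = []
      then 0 else 1 + pvMaxIntD (((pvChildrenB P).getD n []).map (pvDepth P)) := by
  unfold pvDepth
  conv_lhs => rw [show P.length + 1 = Nat.succ P.length from rfl]
  simp only [pvDP]
  by_cases hcs : (pvChildrenB P).getD n [] = []
  · simp [hcs]
  · simp only [hcs, ite_false]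
    congr 2
    apply List.map_congr_left
    intro c hcmem
    have hP : (n, c) ∈ P := pvMem_children.mp hcmem
    have hrc : pvBR P P.length r c = true := pvBR_extend hrn hP
    have hrank : pvRank P c < pvRank P n := pvRank_lt hAcy hrn hP
    have hle : pvRank P n ≤ P.length := pvRank_le P n
    exact pvDP_stable hAcy P.length c (P.length + 1) hrc (by omega) (by omega)

-- ---- A's cached recursion computes pvDepth ----

def pvGood (P : List (String × String)) (cache : PySem.Dict String Int) : Prop :=
  ∀ k v, cache.get? k = some v → v = pvDepth P k

theorem pvComputeA_ok {P : List (String × String)} {r : String} (hAcy : pvAcy P r) :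
    ∀ (f : Nat) (n : String) (cache : PySem.Dict String Int),
      pvBR P P.length r n = true → pvRank P n < f → pvGood P cache →
      (pvComputeA (pvChildrenB P) f n cache).1 = pvDepth P n ∧
      pvGood P (pvComputeA (pvChildrenB P) f n cache).2 := by
  intro f
  induction f using Nat.strong_induction_on with
  | _ f ihf =>
    intro n cache hrn hf hgood
    cases f with
    | zero => omega
    | succ f' =>
      simp only [pvComputeA]
      cases hc : cache.get? n with
      | some v => exact ⟨hgood n v hc, hgood⟩
      | none =>
        by_cases hcs : (pvChildrenB P).getD n [] = []
        · simp only [hcs, if_pos]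
          have hd0 : pvDepth P n = 0 := by rw [pvDepth_node hAcy hrn, if_pos hcs]
          refine ⟨hd0.symm, ?_⟩
          intro k v hkv
          rw [PySem.Dict.get?_insert] at hkv
          by_cases hkn : k = n
          · rw [if_pos hkn] at hkv
            cases hkv; rw [hkn, hd0]
          · rw [if_neg hkn] at hkv
            exact hgood k v hkv
        · simp only [hcs, ite_false]
          have hfold : ∀ (cs : List String) (acc : List Int × PySem.Dict String Int),
              (∀ c ∈ cs, pvBR P P.length r c = true ∧ pvRank P c < f') → pvGood P acc.2 →
              (cs.foldl (fun (acc : List Int × PySem.Dict String Int) c =>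
                  let vc := pvComputeA (pvChildrenB P) f' c acc.2
                  (acc.1 ++ [vc.1], vc.2)) acc).1 = acc.1 ++ cs.map (pvDepth P) ∧
              pvGood P ((cs.foldl (fun (acc : List Int × PySem.Dict String Int) c =>
                  let vc := pvComputeA (pvChildrenB P) f' c acc.2
                  (acc.1 ++ [vc.1], vc.2)) acc).2) := by
            intro cs
            induction cs with
            | nil => intro acc _ hg; exact ⟨by simp, hg⟩
            | cons c cs ihcs =>
              intro acc hpre hg
              have hhead := hpre c (List.mem_cons_self ..)
              have hres := ihf f' (Nat.lt_succ_self _) c acc.2 hhead.1 hhead.2 hg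
              simp only [List.foldl_cons]
              have := ihcs ((acc.1 ++ [(pvComputeA (pvChildrenB P) f' c acc.2).1],
                  (pvComputeA (pvChildrenB P) f' c acc.2).2))
                (fun c' hc' => hpre c' (List.mem_cons_of_mem _ hc')) hres.2
              refine ⟨?_, this.2⟩
              rw [this.1, hres.1]
              simp
          have hpre2 : ∀ c ∈ (pvChildrenB P).getD n [],
              pvBR P P.length r c = true ∧ pvRank P c < f' := by
            intro c hcmem
            have hP : (n, c) ∈ P := pvMem_children.mp hcmem
            have hrank : pvRank P c < pvRank P n := pvRank_lt hAcy hrn hP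
            exact ⟨pvBR_extend hrn hP, by omega⟩
          have hmain := hfold ((pvChildrenB P).getD n []) ([], cache) hpre2 hgood
          have hdn : pvDepth P n
              = 1 + pvMaxIntD (((pvChildrenB P).getD n []).map (pvDepth P)) := by
            rw [pvDepth_node hAcy hrn, if_neg hcs]
          constructor
          · simp only [hmain.1]
            rw [hdn]
            simp
          · intro k v hkv
            rw [PySem.Dict.get?_insert] at hkv
            by_cases hkn : k = n
            · rw [if_pos hkn] at hkv
              cases hkv
              rw [hkn, hdn, hmain.1]
              simp
            · rw [if_neg hkn] at hkv
              exact hmain.2 k v hkv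

theorem pvChildren_val_ne_nil {P : List (String × String)} {n : String} {cs : List String}
    (h : (pvChildrenB P).get? n = some cs) : cs ≠ [] := by
  have hne : (pvChildrenB P).get? n ≠ none := by rw [h]; exact Option.some_ne_none _
  have hkeys : n ∈ (pvChildrenB P).keys := by
    by_contra hmem
    exact hne ((PySem.Dict.get?_eq_none_iff_not_mem_keys _ _).mpr hmem)
  rw [pvChildren_keys] at hkeys
  have hmap : n ∈ P.map Prod.fst := (PySem.Set.mem_ofList _ _).mp hkeys
  rcases List.mem_map.mp hmap with ⟨p, hp, hp1⟩
  have hmemP : (n, p.2) ∈ P := by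
    have hpe : p = (n, p.2) := Prod.ext hp1 rfl
    rwa [hpe] at hp
  have hmemc : p.2 ∈ (pvChildrenB P).getD n [] := pvMem_children.mpr hmemP
  have hgd : (pvChildrenB P).getD n [] = cs := by
    show ((pvChildrenB P).get? n).getD [] = cs
    rw [h]; rfl
  rw [hgd] at hmemc
  exact List.ne_nil_of_mem hmemc

-- ---- B's iteration computes pvDP ----

theorem pvIterB_getD (P : List (String × String)) :
    ∀ (k : Nat) (n : String), (pvIterB (pvChildrenB P) k).getD n 0 = pvDP (pvChildrenB P) k n := by
  intro k
  induction k with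
  | zero => intro n; simp [pvIterB, pvDP, PySem.Dict.getD_empty]
  | succ k ih =>
    intro n
    have hnodup : ((pvChildrenB P).items.map Prod.fst).Nodup := by
      have hnd := pvChildren_nodup_keys P
      simpa [PySem.Dict.keys] using hnd
    have hitems : (pvStepB (pvChildrenB P) (pvIterB (pvChildrenB P) k)).items
        = (pvChildrenB P).items.map (fun p => (p.1,
            1 + pvMaxIntD (p.2.map (fun c => (pvIterB (pvChildrenB P) k).getD c 0)))) := by
      unfold pvStepB
      rw [PySem.Dict.items_foldl_insert_fresh _ _ _ _ (by intro a _; exact PySem.Dict.contains_empty _) hnodup]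
      simp [PySem.Dict.empty]
    have hkeys : (pvStepB (pvChildrenB P) (pvIterB (pvChildrenB P) k)).keys
        = (pvChildrenB P).keys := by
      simp only [PySem.Dict.keys, hitems, List.map_map]
      rfl
    show (pvIterB (pvChildrenB P) (k+1)).getD n 0 = _
    have hstep : pvIterB (pvChildrenB P) (k+1)
        = pvStepB (pvChildrenB P) (pvIterB (pvChildrenB P) k) := rfl
    rw [hstep]
    cases hcn : (pvChildrenB P).get? n with
    | some cs =>
      have hmemit : (n, cs) ∈ (pvChildrenB P).items :=
        PySem.Dict.mem_items_of_get?_eq_some _ hcn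
      have hmem2 : (n, 1 + pvMaxIntD (cs.map (fun c => (pvIterB (pvChildrenB P) k).getD c 0)))
          ∈ (pvStepB (pvChildrenB P) (pvIterB (pvChildrenB P) k)).items := by
        rw [hitems]
        exact List.mem_map.mpr ⟨(n, cs), hmemit, rfl⟩
      have hndstep : (pvStepB (pvChildrenB P) (pvIterB (pvChildrenB P) k)).keys.Nodup := by
        rw [hkeys]; exact pvChildren_nodup_keys P
      rw [PySem.Dict.getD_of_mem_items _ hmem2 hndstep]
      have hmapeq : cs.map (fun c => (pvIterB (pvChildrenB P) k).getD c 0)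
          = cs.map (pvDP (pvChildrenB P) k) := List.map_congr_left (fun c _ => ih c)
      rw [hmapeq]
      have hgd : (pvChildrenB P).getD n [] = cs := by
        show ((pvChildrenB P).get? n).getD [] = cs
        rw [hcn]; rfl
      simp only [pvDP, hgd]
      rw [if_neg (pvChildren_val_ne_nil hcn)]
    | none =>
      have hnk : n ∉ (pvChildrenB P).keys := (PySem.Dict.get?_eq_none_iff_not_mem_keys _ _).mp hcn
      have hsn : (pvStepB (pvChildrenB P) (pvIterB (pvChildrenB P) k)).get? n = none := by
        apply (PySem.Dict.get?_eq_none_iff_not_mem_keys _ _).mpr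
        rwa [hkeys]
      have hgd : (pvChildrenB P).getD n [] = [] := by
        show ((pvChildrenB P).get? n).getD [] = []
        rw [hcn]; rfl
      have hL : (pvStepB (pvChildrenB P) (pvIterB (pvChildrenB P) k)).getD n 0 = 0 := by
        show ((pvStepB (pvChildrenB P) (pvIterB (pvChildrenB P) k)).get? n).getD 0 = 0
        rw [hsn]; rfl
      rw [hL]
      simp [pvDP, hgd]

-- ---- main theorem ----

theorem assign_layers_py_spec : Claim_equal_assign_layers_py := by
  intro nodes edges _hdom hpre
  obtain ⟨_hid, hacy⟩ := hpre
  have hPle : (pvPairs edges).length ≤ edges.length := List.length_filterMap_le _ _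
  -- A's node loop, with the cache invariant, equals the pure bucketing fold
  have hAfold : ∀ (ns : List (List (String × String))),
      (∀ node ∈ ns, pvAcy (pvPairs edges) (pvNodeId node)) →
      ∀ (lm : PySem.Dict Int (List (List (String × String)))) (cache : PySem.Dict String Int),
      pvGood (pvPairs edges) cache →
      (ns.foldl (fun (acc : PySem.Dict Int (List (List (String × String))) × PySem.Dict String Int) node =>
          let lc := pvComputeA (pvChildrenB (pvPairs edges)) (edges.length + 1) (pvNodeId node) acc.2
          (acc.1.modify lc.1 [] (· ++ [node]), lc.2)) (lm, cache)).1
        = ns.foldl (fun lm node =>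
            lm.modify (pvDepth (pvPairs edges) (pvNodeId node)) [] (· ++ [node])) lm := by
    intro ns
    induction ns with
    | nil => intro _ lm cache _; rfl
    | cons node ns ih =>
      intro hns lm cache hgood
      have hAcy0 : pvAcy (pvPairs edges) (pvNodeId node) := hns node (List.mem_cons_self ..)
      have hrank : pvRank (pvPairs edges) (pvNodeId node) < edges.length + 1 := by
        have := pvRank_le (pvPairs edges) (pvNodeId node); omega
      have hok := pvComputeA_ok hAcy0 (edges.length + 1) (pvNodeId node) cache
        (pvBR_refl _ _ _) hrank hgood
      rw [List.foldl_cons, List.foldl_cons]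
      have hstep : (let lc := pvComputeA (pvChildrenB (pvPairs edges)) (edges.length + 1) (pvNodeId node) (lm, cache).2
          ((lm, cache).1.modify lc.1 [] fun x => x ++ [node], lc.2))
          = (lm.modify (pvDepth (pvPairs edges) (pvNodeId node)) [] fun x => x ++ [node],
             (pvComputeA (pvChildrenB (pvPairs edges)) (edges.length + 1) (pvNodeId node) cache).2) := by
        show (lm.modify (pvComputeA (pvChildrenB (pvPairs edges)) (edges.length + 1) (pvNodeId node) cache).1 [] fun x => x ++ [node],
              (pvComputeA (pvChildrenB (pvPairs edges)) (edges.length + 1) (pvNodeId node) cache).2) = _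
        rw [hok.1]
      rw [hstep]
      exact ih (fun n hn => hns n (List.mem_cons_of_mem _ hn)) _ _ hok.2
  -- B's node loop equals the same pure bucketing fold
  have hBfold :
      (nodes.foldl (fun lm node =>
          let dep := (pvIterB (pvChildrenB (pvPairs edges)) (edges.length + 1)).getD (pvNodeId node) 0
          lm.insert dep (lm.getD dep [] ++ [node]))
        (PySem.Dict.empty : PySem.Dict Int (List (List (String × String)))))
      = nodes.foldl (fun lm node =>
          lm.modify (pvDepth (pvPairs edges) (pvNodeId node)) [] (· ++ [node])) PySem.Dict.empty := by
    apply PySem.List.foldl_congr_mem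
    intro acc node hmem
    have hAcy0 : pvAcy (pvPairs edges) (pvNodeId node) := hacy node hmem
    have hdep : (pvIterB (pvChildrenB (pvPairs edges)) (edges.length + 1)).getD (pvNodeId node) 0
        = pvDepth (pvPairs edges) (pvNodeId node) := by
      rw [pvIterB_getD]
      have hrank := pvRank_le (pvPairs edges) (pvNodeId node)
      exact pvDP_stable hAcy0 (edges.length + 1) (pvNodeId node) ((pvPairs edges).length + 1)
        (pvBR_refl _ _ _) (by omega) (by omega)
    show acc.insert ((pvIterB (pvChildrenB (pvPairs edges)) (edges.length + 1)).getD (pvNodeId node) 0)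
        (acc.getD ((pvIterB (pvChildrenB (pvPairs edges)) (edges.length + 1)).getD (pvNodeId node) 0) [] ++ [node]) = _
    rw [hdep]
    rfl
  have hgood0 : pvGood (pvPairs edges) (PySem.Dict.empty : PySem.Dict String Int) := by
    intro k v h
    rw [PySem.Dict.get?_empty] at h
    cases h
  show assign_layers_py nodes edges = assign_layers_py_alt nodes edges
  simp only [assign_layers_py, assign_layers_py_alt, pvChildrenA_eq]
  rw [hAfold nodes hacy PySem.Dict.empty PySem.Dict.empty hgood0, hBfold]
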